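-- pv_equiv track=rewrite | github.com/koii-network/prometheus-beta | src/palindrome_pair.py | palindrome_pair
-- ===== SOURCE A (Python) =====
-- def palindrome_pair(numbers):
--     """
--     Check if there is a pair of numbers in the sorted list
--     whose difference is a palindrome.
--
--     Args:
--         numbers (list): A sorted list of numbers
--
--     Returns:
--         bool: True if a palindrome difference pair exists, False otherwise
--     """
--     # If list is too short to form a pair, return False
--     if len(numbers) < 2:
--         return False
--
--     # Check each possible pair
--     for i in range(len(numbers)):
--         for j in range(i+1, len(numbers)):
--             # Calculate the absolute difference
--             diff = abs(numbers[j] - numbers[i])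
--
--             # Convert difference to string to check if it's a palindrome
--             diff_str = str(diff)
--
--             # Check if difference is a palindrome
--             if diff_str == diff_str[::-1]:
--                 return True
--
--     # No palindrome difference pair found
--     return False
-- ===== SOURCE B (Python) =====
-- def palindrome_pair(numbers):
--     def _is_pal(s):
--         if len(s) < 2:
--             return True
--         return s[0] == s[-1] and _is_pal(s[1:-1])
--
--     vals = sorted(set(numbers))
--     if len(vals) < len(numbers):
--         return True  # a duplicate pair has difference 0, which is a palindrome
--     return any(_is_pal(str(y - x))
--                for i, x in enumerate(vals)
--                for y in vals[i + 1:])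
-- ===== Notes on version B (the rewrite author's own statement) =====
-- stated objective: alternative
-- what changed: Replaces the index-based double loop over raw positions (abs diff, full string-reversal palindrome test) by dedup-then-sort: duplicates short-circuit to True via the set size (difference 0), otherwise pairs of the strictly increasing distinct values are scanned with positive differences (no abs) and a recursive two-ended halving palindrome test instead of s == s[::-1].
import Mathlib
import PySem

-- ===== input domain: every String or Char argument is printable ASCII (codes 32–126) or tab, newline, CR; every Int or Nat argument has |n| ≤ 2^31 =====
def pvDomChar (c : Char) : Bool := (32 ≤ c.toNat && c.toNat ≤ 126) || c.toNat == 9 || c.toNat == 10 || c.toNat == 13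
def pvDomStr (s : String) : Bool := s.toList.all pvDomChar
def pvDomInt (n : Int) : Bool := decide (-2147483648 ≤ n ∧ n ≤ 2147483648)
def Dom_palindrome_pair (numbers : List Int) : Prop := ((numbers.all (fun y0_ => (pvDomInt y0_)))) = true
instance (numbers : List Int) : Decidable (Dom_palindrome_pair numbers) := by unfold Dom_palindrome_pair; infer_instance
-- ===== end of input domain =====

-- B replaces A's positional double loop (abs diff, s == s[::-1]) by dedup-then-sort with a
-- duplicate short-circuit and a recursive two-ended palindrome test; alternative decomposition, same worst-case cost.

-- ===== PORT A =====
def palindrome_pair (numbers : List Int) : Bool :=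
  if numbers.length < 2 then false
  else
    (PySem.List.pyRange 0 (numbers.length : Int) 1).any (fun i =>
      (PySem.List.pyRange (i + 1) (numbers.length : Int) 1).any (fun j =>
        let diff : Int := |PySem.List.pyGetD numbers j 0 - PySem.List.pyGetD numbers i 0|
        let diffStr : List Char := PySem.Int.toChars diff
        diffStr == (PySem.List.slice? diffStr none none (-1)).getD []))

-- ===== PORT B =====
-- _is_pal: recursive two-ended halving palindrome test (s[0] == s[-1] and _is_pal(s[1:-1]))
def isPalHalf (s : List Char) : Bool :=
  if h : s.length < 2 then true
  else
    (PySem.List.pyGetD s 0 ' ' == PySem.List.pyGetD s (-1) ' ') &&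
    isPalHalf (PySem.List.slice s (some 1) (some (-1)))
termination_by s.length
decreasing_by
  have hs : s ≠ [] := by rintro rfl; simp at h
  simp [PySem.List.length_slice, PySem.List.clampIdx, hs]
  omega

def palindrome_pair_alt (numbers : List Int) : Bool :=
  let vals : List Int := PySem.List.sorted (PySem.Set.ofList numbers) (fun x => x) false
  if vals.length < numbers.length then true
  else
    (PySem.List.enumerate vals 0).any (fun p =>
      (PySem.List.slice vals (some (p.1 + 1)) none).any (fun y =>
        isPalHalf (PySem.Int.toChars (y - p.2))))

-- ===== PRECONDITION & SPEC =====
def Spec_palindrome_pair (numbers : List Int) (out : Bool) : Prop := out = palindrome_pair_alt numbers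
instance (numbers : List Int) (out : Bool) : Decidable (Spec_palindrome_pair numbers out) := by unfold Spec_palindrome_pair; infer_instance

-- ===== CLAIM (what is proved, stated in full; the proofs are below) =====
def Claim_equal_palindrome_pair : Prop := ∀ (numbers : List Int), Dom_palindrome_pair numbers → Spec_palindrome_pair numbers (palindrome_pair numbers)

-- ===== LEMMAS AND PROOFS =====

-- the palindrome test, as a predicate on the difference
def palB (d : Int) : Bool := PySem.Int.toChars d == (PySem.Int.toChars d).reverse

-- "some pair of positions carries a palindromic absolute difference"
def Epair (l : List Int) : Prop :=
  ∃ (i j : Nat) (hi : i < l.length) (hj : j < l.length), i < j ∧ palB |l[j] - l[i]| = true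

-- the value-level form of Epair, used to transport it along dedup + sort
def Fpair (l : List Int) : Prop := ∃ x ∈ l, ∃ y ∈ l, x ≠ y ∧ palB |y - x| = true

theorem isPalHalf_eq (s : List Char) : isPalHalf s = (s == s.reverse) := by
  induction s using isPalHalf.induct with
  | case1 s h =>
    rw [isPalHalf, dif_pos h]
    rcases s with _ | ⟨a, t⟩
    · simp
    · rcases t with _ | ⟨b, t⟩
      · simp
      · simp at h
  | case2 s h IH =>
    rcases s with _ | ⟨a, t⟩
    · simp at h
    rcases List.eq_nil_or_concat t with rfl | ⟨m, z, rfl⟩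
    · simp at h
    simp only [List.concat_eq_append] at *
    have h3 : PySem.List.slice (a :: (m ++ [z])) (some 1) (some (-1)) = m := by
      rw [PySem.List.slice]
      simp [PySem.List.clampIdx]
      rw [if_neg (by omega)]
      simp
    have h1 : PySem.List.pyGetD (a :: (m ++ [z])) 0 ' ' = a := by simp [pysem]
    have h2 : PySem.List.pyGetD (a :: (m ++ [z])) (-1) ' ' = z := by simp [pysem]
    rw [h3] at IH
    rw [isPalHalf, dif_neg h, h3, IH, h1, h2, Bool.eq_iff_iff]
    simp only [Bool.and_eq_true, beq_iff_eq, List.reverse_cons, List.reverse_append,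
      List.reverse_nil, List.nil_append, List.cons_append]
    constructor
    · rintro ⟨rfl, hm⟩
      rw [← hm]
    · intro hEq
      rw [List.cons.injEq] at hEq
      obtain ⟨rfl, htail⟩ := hEq
      refine ⟨rfl, ?_⟩
      exact (List.append_left_inj _).mp htail

theorem palA_iff (l : List Int) : palindrome_pair l = true ↔ Epair l := by
  rw [palindrome_pair]
  split
  · rename_i hlt
    simp only [Bool.false_eq_true, false_iff]
    rintro ⟨i, j, hi, hj, hij, -⟩
    omega
  · rename_i hge
    rw [List.any_eq_true]
    constructor
    · rintro ⟨i, hiMem, hbody⟩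
      rw [List.any_eq_true] at hbody
      obtain ⟨j, hjMem, hP⟩ := hbody
      rw [PySem.List.mem_pyRange_one] at hiMem hjMem
      simp only [PySem.List.slice?_none_none_neg_one, Option.getD_some,
        PySem.List.pyGetD_of_nonneg l 0 (by omega : (0:Int) ≤ j),
        PySem.List.pyGetD_of_nonneg l 0 (by omega : (0:Int) ≤ i)] at hP
      rw [List.getD_eq_getElem l 0 (by omega), List.getD_eq_getElem l 0 (by omega)] at hP
      exact ⟨i.toNat, j.toNat, by omega, by omega, by omega, hP⟩
    · rintro ⟨i, j, hi, hj, hij, hP⟩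
      refine ⟨(i : Int), ?_, ?_⟩
      · rw [PySem.List.mem_pyRange_one]; omega
      rw [List.any_eq_true]
      refine ⟨(j : Int), ?_, ?_⟩
      · rw [PySem.List.mem_pyRange_one]; omega
      simp only [PySem.List.slice?_none_none_neg_one, Option.getD_some,
        PySem.List.pyGetD_of_nonneg l 0 (by omega : (0:Int) ≤ (j:Int)),
        PySem.List.pyGetD_of_nonneg l 0 (by omega : (0:Int) ≤ (i:Int))]
      rw [Int.toNat_natCast, Int.toNat_natCast, List.getD_eq_getElem l 0 hj, List.getD_eq_getElem l 0 hi]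
      exact hP

theorem ofList_sublist (l : List Int) : (PySem.Set.ofList l).Sublist l := by
  induction l with
  | nil => simp [PySem.Set.ofList]
  | cons x xs ih =>
    rw [PySem.Set.ofList_cons]
    exact List.cons_sublist_cons.mpr (List.filter_sublist.trans ih)

theorem Epair_iff_Fpair (l : List Int) (h : l.Nodup) : Epair l ↔ Fpair l := by
  constructor
  · rintro ⟨i, j, hi, hj, hij, hP⟩
    refine ⟨l[i], List.getElem_mem hi, l[j], List.getElem_mem hj, ?_, hP⟩
    intro he
    have := (h.getElem_inj_iff).mp he.symm
    omega
  · rintro ⟨x, hx, y, hy, hne, hP⟩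
    obtain ⟨i, hi, rfl⟩ := List.mem_iff_getElem.mp hx
    obtain ⟨j, hj, rfl⟩ := List.mem_iff_getElem.mp hy
    rcases lt_trichotomy i j with hij | rfl | hij
    · exact ⟨i, j, hi, hj, hij, hP⟩
    · exact absurd rfl hne
    · exact ⟨j, i, hj, hi, hij, by rwa [abs_sub_comm]⟩

theorem Fpair_perm {l l' : List Int} (h : l.Perm l') : Fpair l ↔ Fpair l' := by
  unfold Fpair
  constructor <;> rintro ⟨x, hx, y, hy, hne, hP⟩
  · exact ⟨x, h.mem_iff.mp hx, y, h.mem_iff.mp hy, hne, hP⟩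
  · exact ⟨x, h.mem_iff.mpr hx, y, h.mem_iff.mpr hy, hne, hP⟩

theorem palB_iff (l : List Int) : palindrome_pair_alt l = true ↔ Epair l := by
  rw [palindrome_pair_alt]
  set vals := PySem.List.sorted (PySem.Set.ofList l) (fun x => x) false with hvals
  split
  · rename_i hlt
    simp only [true_iff]
    -- vals shorter than l ⇒ l has a duplicate ⇒ difference 0, a palindrome
    rw [PySem.List.length_sorted] at hlt
    have hnd : ¬ l.Nodup := fun h => by
      rw [PySem.Set.ofList_eq_self_of_nodup l h] at hlt; omega
    rw [List.nodup_iff_getElem?_ne_getElem?] at hnd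
    push Not at hnd
    obtain ⟨i, j, hij, hj, heq⟩ := hnd
    have hi : i < l.length := by omega
    rw [List.getElem?_eq_getElem hi, List.getElem?_eq_getElem hj, Option.some_inj] at heq
    refine ⟨i, j, hi, hj, hij, ?_⟩
    rw [heq, sub_self, abs_zero]
    decide
  · rename_i hge
    rw [PySem.List.length_sorted] at hge
    have heq : PySem.Set.ofList l = l :=
      (ofList_sublist l).eq_of_length_le (by omega)
    have hnd : l.Nodup := by rw [← heq]; exact PySem.Set.nodup_ofList l
    have hpw : vals.Pairwise (· < ·) := PySem.List.sorted_ofList_pairwise_lt l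
    have hperm : vals.Perm l := by rw [hvals, heq]; exact PySem.List.sorted_perm l _ _
    have hndv : vals.Nodup := hpw.imp ne_of_lt
    -- the double any ↔ Epair vals
    have hany : ((PySem.List.enumerate vals 0).any (fun p =>
        (PySem.List.slice vals (some (p.1 + 1)) none).any (fun y =>
          isPalHalf (PySem.Int.toChars (y - p.2)))) = true) ↔ Epair vals := by
      rw [List.any_eq_true]
      constructor
      · rintro ⟨p, hpMem, hbody⟩
        rw [PySem.List.mem_enumerate_iff] at hpMem
        obtain ⟨k, hk, rfl⟩ := hpMem
        rw [List.any_eq_true] at hbody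
        obtain ⟨y, hyMem, hP⟩ := hbody
        have hcast : (0 + (k : Int)) + 1 = ((k + 1 : Nat) : Int) := by push_cast; ring
        rw [hcast, PySem.List.slice_from_natCast] at hyMem
        obtain ⟨m, hm, rfl⟩ := List.mem_iff_getElem.mp hyMem
        rw [List.getElem_drop] at hP
        have hmlen : k + 1 + m < vals.length := by
          have := hm; rw [List.length_drop] at this; omega
        refine ⟨k, k + 1 + m, hk, hmlen, by omega, ?_⟩
        have hlt' : vals[k] < vals[k + 1 + m] :=
          List.pairwise_iff_getElem.mp hpw k (k + 1 + m) hk hmlen (by omega)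
        rw [abs_of_pos (by omega)]
        rw [isPalHalf_eq] at hP
        exact hP
      · rintro ⟨i, j, hi, hj, hij, hP⟩
        refine ⟨(0 + (i : Int), vals[i]), ?_, ?_⟩
        · rw [PySem.List.mem_enumerate_iff]; exact ⟨i, hi, rfl⟩
        rw [List.any_eq_true]
        have hcast : (0 + (i : Int)) + 1 = ((i + 1 : Nat) : Int) := by push_cast; ring
        rw [hcast, PySem.List.slice_from_natCast]
        refine ⟨vals[j], ?_, ?_⟩
        · rw [List.mem_iff_getElem]
          refine ⟨j - (i + 1), ?_, ?_⟩
          · rw [List.length_drop]; omega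
          · rw [List.getElem_drop]; congr 1; omega
        · have hlt' : vals[i] < vals[j] :=
            List.pairwise_iff_getElem.mp hpw i j hi hj hij
          rw [isPalHalf_eq]
          rwa [abs_of_pos (by omega)] at hP
    rw [hany, Epair_iff_Fpair vals hndv, Fpair_perm hperm, ← Epair_iff_Fpair l hnd]

-- ===== VERDICT (by name: the statement is the Claim_ definition above) =====
theorem palindrome_pair_spec : Claim_equal_palindrome_pair := by
  intro numbers _
  unfold Spec_palindrome_pair
  rw [Bool.eq_iff_iff, palA_iff, palB_iff]
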